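-- pv_equiv track=rewrite | github.com/johron/advent_of_code | 2020/day_06/exercise.py | get_sum_of_consensus
-- ===== SOURCE A (Python) =====
-- def get_sum_of_consensus(sections):
--     total_sum = 0
--     for section in sections:
--         answers = set()
--         discard = set()
--         for line in section.splitlines():
--             for char in line.strip():
--                 answers.add(char)
--
--         for char in answers:
--             for line in section.splitlines():
--                 if char not in line.strip():
--                     discard.add(char)
--         total_sum += len(answers) - len(discard)
--     return total_sum
-- ===== SOURCE B (Python) =====
-- def get_sum_of_consensus(sections):
--     total = 0
--     for section in sections:
--         line_sets = [set(line.strip()) for line in section.splitlines()]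
--         if line_sets:
--             common = line_sets[0]
--             for s in line_sets[1:]:
--                 common = common & s
--             total += len(common)
--     return total
-- ===== Notes on version B (the rewrite author's own statement) =====
-- stated objective: alternative
-- what changed: Per section, B intersects per-line character sets in a single pass instead of A's nested rescan of all lines for every distinct character; intended as faster (O(total chars) vs O(distinct chars * total chars) per section) but a timing run read only ~1.4-1.5x on the generated inputs.
import Mathlib
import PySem

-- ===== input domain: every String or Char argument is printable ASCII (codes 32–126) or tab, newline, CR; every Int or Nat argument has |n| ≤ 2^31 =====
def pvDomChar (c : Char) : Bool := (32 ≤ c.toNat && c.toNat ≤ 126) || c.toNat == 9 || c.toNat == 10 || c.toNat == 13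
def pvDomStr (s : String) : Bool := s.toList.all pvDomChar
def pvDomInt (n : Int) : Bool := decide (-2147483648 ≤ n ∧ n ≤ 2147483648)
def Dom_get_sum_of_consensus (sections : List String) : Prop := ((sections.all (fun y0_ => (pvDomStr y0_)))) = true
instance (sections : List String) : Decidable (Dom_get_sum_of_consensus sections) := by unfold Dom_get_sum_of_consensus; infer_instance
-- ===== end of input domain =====

-- B replaces A's per-character rescan of every line by a single-pass intersection of per-line
-- character sets (objective: alternative algorithm; measured ~1.4-1.5x on generated inputs).

-- ===== PORT A =====
def get_sum_of_consensus (sections : List String) : Int :=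
  sections.foldl
    (fun total_sum sec =>
      let answers : PySem.Set Char :=
        (PySem.Str.splitlines sec).foldl
          (fun ans line => (PySem.Str.strip line).toList.foldl PySem.Set.add ans)
          PySem.Set.empty
      let discard : PySem.Set Char :=
        answers.foldl
          (fun dis c =>
            (PySem.Str.splitlines sec).foldl
              (fun dis' line =>
                if c ∈ (PySem.Str.strip line).toList then dis' else PySem.Set.add dis' c)
              dis)
          PySem.Set.empty
      total_sum + (PySem.Set.len answers - PySem.Set.len discard))
    0

-- ===== PORT B =====
def get_sum_of_consensus_alt (sections : List String) : Int :=
  sections.foldl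
    (fun total sec =>
      let lineSets : List (PySem.Set Char) :=
        (PySem.Str.splitlines sec).map
          (fun line => PySem.Set.ofList (PySem.Str.strip line).toList)
      match lineSets with
      | [] => total
      | h :: t => total + PySem.Set.len (t.foldl PySem.Set.inter h))
    0

-- ===== PRECONDITION & SPEC =====
def Spec_get_sum_of_consensus (sections : List String) (out : Int) : Prop := out = get_sum_of_consensus_alt sections
instance (sections : List String) (out : Int) : Decidable (Spec_get_sum_of_consensus sections out) := by unfold Spec_get_sum_of_consensus; infer_instance

-- ===== CLAIM (what is proved, stated in full; the proofs are below) =====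
def Claim_equal_get_sum_of_consensus : Prop := ∀ (sections : List String), Dom_get_sum_of_consensus sections → Spec_get_sum_of_consensus sections (get_sum_of_consensus sections)

-- ===== LEMMAS AND PROOFS =====

-- A's answers-building loop is set(flatten of the stripped lines).
theorem ansFold (ls : List (List Char)) (s : PySem.Set Char) :
    ls.foldl (fun a cs => cs.foldl PySem.Set.add a) s = PySem.Set.update s ls.flatten := by
  induction ls generalizing s with
  | nil => rfl
  | cons x xs ih => simpa [PySem.Set.update_append] using ih (PySem.Set.update s x)

-- the inner discard loop is a no-op once c is already in the accumulator
theorem innerFold_of_mem (ls : List (List Char)) (c : Char) (d : PySem.Set Char) (hc : c ∈ d) :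
    ls.foldl (fun d' cs => if c ∈ cs then d' else PySem.Set.add d' c) d = d := by
  induction ls with
  | nil => rfl
  | cons x xs ih => by_cases h : c ∈ x <;> simp [h, PySem.Set.add_of_mem hc, ih]

-- the inner discard loop adds c exactly when some stripped line misses c
theorem innerFold_eq (ls : List (List Char)) (c : Char) (d : PySem.Set Char) :
    ls.foldl (fun d' cs => if c ∈ cs then d' else PySem.Set.add d' c) d
      = if ls.all (fun cs => decide (c ∈ cs)) then d else PySem.Set.add d c := by
  induction ls generalizing d with
  | nil => rfl
  | cons x xs ih =>
    by_cases h : c ∈ x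
    · simp [h, ih]
    · have hmem : c ∈ PySem.Set.add d c := by
        by_cases hd : c ∈ d
        · simpa [PySem.Set.add_of_mem hd]
        · simp [PySem.Set.add_of_not_mem hd]
      simp [h, innerFold_of_mem xs c _ hmem]

-- a conditional-add fold over a Nodup list of fresh elements is a filter
theorem condAddFold (p : Char → Bool) :
    ∀ (as : List Char) (d : PySem.Set Char), as.Nodup → (∀ c ∈ as, c ∉ d) →
    as.foldl (fun d' c => if p c then d' else PySem.Set.add d' c) d
      = d ++ as.filter (fun c => !p c)
  | [], d, _, _ => by simp
  | a :: as, d, hnd, hfresh => by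
    rcases List.nodup_cons.mp hnd with ⟨hna, hnd'⟩
    by_cases h : p a
    · simpa [h] using condAddFold p as d hnd' (fun c hc => hfresh c (List.mem_cons_of_mem _ hc))
    · have hadd : PySem.Set.add d a = d ++ [a] :=
        PySem.Set.add_of_not_mem (hfresh a (List.mem_cons_self))
      have hfresh' : ∀ c ∈ as, c ∉ d ++ [a] := by
        intro c hc
        simp only [List.mem_append, List.mem_singleton]
        rintro (hcd | rfl)
        · exact hfresh c (List.mem_cons_of_mem _ hc) hcd
        · exact hna hc
      simpa [h, hadd] using condAddFold p as (d ++ [a]) hnd' hfresh'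

-- B's intersection fold: membership and Nodup
theorem interFold (t : List (PySem.Set Char)) (h : PySem.Set Char) (hnd : h.Nodup) :
    (t.foldl PySem.Set.inter h).Nodup ∧
      (∀ c, c ∈ t.foldl PySem.Set.inter h ↔ c ∈ h ∧ ∀ s ∈ t, c ∈ s) := by
  induction t generalizing h with
  | nil => exact ⟨hnd, by simp⟩
  | cons x xs ih =>
    obtain ⟨n, m⟩ := ih (PySem.Set.inter h x) (PySem.Set.nodup_inter h x hnd)
    refine ⟨n, fun c => ?_⟩
    rw [List.foldl_cons, m c, PySem.Set.mem_inter]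
    constructor
    · rintro ⟨⟨hh, hx⟩, hall⟩
      refine ⟨hh, fun s hs => ?_⟩
      rcases List.mem_cons.mp hs with rfl | hs'
      · exact hx
      · exact hall s hs'
    · rintro ⟨hh, hall⟩
      exact ⟨⟨hh, hall x List.mem_cons_self⟩, fun s hs => hall s (List.mem_cons_of_mem _ hs)⟩

-- per-section agreement, stated over the stripped lines
theorem section_count (ls : List (List Char)) :
    (PySem.Set.len (PySem.Set.ofList ls.flatten)
      - PySem.Set.len ((PySem.Set.ofList ls.flatten).foldl
          (fun dis c =>
            ls.foldl (fun d' cs => if c ∈ cs then d' else PySem.Set.add d' c) dis)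
          PySem.Set.empty))
    = (match ls.map PySem.Set.ofList with
       | [] => (0 : Int)
       | h :: t => PySem.Set.len (t.foldl PySem.Set.inter h)) := by
  set p : Char → Bool := fun c => ls.all (fun cs => decide (c ∈ cs)) with hp
  set A : PySem.Set Char := PySem.Set.ofList ls.flatten with hA
  have hAnd : A.Nodup := PySem.Set.nodup_ofList ls.flatten
  have hdis : A.foldl
      (fun dis c => ls.foldl (fun d' cs => if c ∈ cs then d' else PySem.Set.add d' c) dis)
      PySem.Set.empty = A.filter (fun c => !p c) := by
    have hbody : (fun (dis : PySem.Set Char) (c : Char) =>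
        ls.foldl (fun d' cs => if c ∈ cs then d' else PySem.Set.add d' c) dis)
        = fun dis c => if p c then dis else PySem.Set.add dis c := by
      funext dis c; exact innerFold_eq ls c dis
    rw [hbody]
    simpa using condAddFold p A PySem.Set.empty hAnd (by simp [PySem.Set.empty])
  rw [hdis]
  have hlen : (A.filter p).length + (A.filter (fun c => !p c)).length = A.length :=
    (List.length_eq_length_filter_add p).symm
  cases ls with
  | nil =>
    simp [hA, PySem.Set.len, PySem.Set.ofList, PySem.Set.empty]
  | cons x xs =>
    have hx : (PySem.Set.ofList x).Nodup := PySem.Set.nodup_ofList x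
    obtain ⟨hcn, hcm⟩ := interFold (xs.map PySem.Set.ofList) (PySem.Set.ofList x) hx
    have hperm : ((xs.map PySem.Set.ofList).foldl PySem.Set.inter (PySem.Set.ofList x)).Perm
        (A.filter p) := by
      rw [List.perm_ext_iff_of_nodup hcn (List.Nodup.filter _ hAnd)]
      intro c
      rw [hcm c, List.mem_filter]
      have h1 : c ∈ PySem.Set.ofList x ↔ c ∈ x := PySem.Set.mem_ofList x c
      have h2 : (∀ s ∈ xs.map PySem.Set.ofList, c ∈ s) ↔ ∀ cs ∈ xs, c ∈ cs := by
        constructor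
        · intro H cs hcs
          exact (PySem.Set.mem_ofList cs c).mp (H _ (List.mem_map_of_mem hcs))
        · intro H s hs
          obtain ⟨cs, hcs, rfl⟩ := List.mem_map.mp hs
          exact (PySem.Set.mem_ofList cs c).mpr (H cs hcs)
      have h3 : c ∈ A ↔ c ∈ (x :: xs).flatten := PySem.Set.mem_ofList _ c
      have h4 : p c = true ↔ (c ∈ x ∧ ∀ cs ∈ xs, c ∈ cs) := by
        rw [hp]
        simp only [List.all_cons, List.all_eq_true, Bool.and_eq_true, decide_eq_true_eq]
      rw [h1, h2, h3, h4]
      constructor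
      · rintro ⟨hcx, hall⟩
        exact ⟨List.mem_flatten.mpr ⟨x, List.mem_cons_self, hcx⟩, hcx, hall⟩
      · rintro ⟨_, hcx, hall⟩
        exact ⟨hcx, hall⟩
    have hLmatch : ((x :: xs).map PySem.Set.ofList) = PySem.Set.ofList x :: xs.map PySem.Set.ofList := rfl
    rw [hLmatch]
    simp only [PySem.Set.len, hperm.length_eq]
    omega

-- one step of the two section loops agree
theorem stepEq (t : Int) (sec : String) :
    (t + (PySem.Set.len
        ((PySem.Str.splitlines sec).foldl
          (fun ans line => (PySem.Str.strip line).toList.foldl PySem.Set.add ans)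
          PySem.Set.empty)
      - PySem.Set.len
        (((PySem.Str.splitlines sec).foldl
            (fun ans line => (PySem.Str.strip line).toList.foldl PySem.Set.add ans)
            PySem.Set.empty).foldl
          (fun dis c =>
            (PySem.Str.splitlines sec).foldl
              (fun dis' line =>
                if c ∈ (PySem.Str.strip line).toList then dis' else PySem.Set.add dis' c)
              dis)
          PySem.Set.empty)))
    = (match (PySem.Str.splitlines sec).map
          (fun line => PySem.Set.ofList (PySem.Str.strip line).toList) with
       | [] => t
       | h :: t' => t + PySem.Set.len (t'.foldl PySem.Set.inter h)) := by
  set ls : List (List Char) :=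
    (PySem.Str.splitlines sec).map (fun l => (PySem.Str.strip l).toList) with hls
  have hans : (PySem.Str.splitlines sec).foldl
      (fun ans line => (PySem.Str.strip line).toList.foldl PySem.Set.add ans)
      PySem.Set.empty = PySem.Set.ofList ls.flatten := by
    rw [hls, ← List.foldl_map, ansFold, PySem.Set.update_empty]
  have hinner : (fun (dis : PySem.Set Char) (c : Char) =>
      (PySem.Str.splitlines sec).foldl
        (fun dis' line =>
          if c ∈ (PySem.Str.strip line).toList then dis' else PySem.Set.add dis' c) dis)
      = fun dis c => ls.foldl (fun d' cs => if c ∈ cs then d' else PySem.Set.add d' c) dis := by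
    funext dis c
    rw [hls, ← List.foldl_map (f := fun l => (PySem.Str.strip l).toList)
      (g := fun d' cs => if c ∈ cs then d' else PySem.Set.add d' c)]
  have hmap : (PySem.Str.splitlines sec).map
      (fun line => PySem.Set.ofList (PySem.Str.strip line).toList)
      = ls.map PySem.Set.ofList := by
    rw [hls, List.map_map]; rfl
  rw [hans, hinner, hmap]
  have hsec := section_count ls
  cases hmtch : ls.map PySem.Set.ofList with
  | nil =>
    rw [hmtch] at hsec
    rw [hsec]
    change t + 0 = t
    omega
  | cons h t' =>
    rw [hmtch] at hsec
    rw [hsec]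

-- ===== VERDICT (by name: the statement is the Claim_ definition above) =====
theorem get_sum_of_consensus_spec : Claim_equal_get_sum_of_consensus := by
  intro sections _
  unfold Spec_get_sum_of_consensus get_sum_of_consensus get_sum_of_consensus_alt
  suffices h : ∀ (ss : List String) (t : Int),
      ss.foldl
        (fun total_sum sec =>
          let answers : PySem.Set Char :=
            (PySem.Str.splitlines sec).foldl
              (fun ans line => (PySem.Str.strip line).toList.foldl PySem.Set.add ans)
              PySem.Set.empty
          let discard : PySem.Set Char :=
            answers.foldl
              (fun dis c =>
                (PySem.Str.splitlines sec).foldl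
                  (fun dis' line =>
                    if c ∈ (PySem.Str.strip line).toList then dis' else PySem.Set.add dis' c)
                  dis)
              PySem.Set.empty
          total_sum + (PySem.Set.len answers - PySem.Set.len discard)) t
      = ss.foldl
          (fun total sec =>
            let lineSets : List (PySem.Set Char) :=
              (PySem.Str.splitlines sec).map
                (fun line => PySem.Set.ofList (PySem.Str.strip line).toList)
            match lineSets with
            | [] => total
            | h :: t' => total + PySem.Set.len (t'.foldl PySem.Set.inter h)) t by
    exact h sections 0
  intro ss
  induction ss with
  | nil => intro t; rfl
  | cons sec rest ih =>
    intro t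
    simp only [List.foldl_cons]
    rw [ih]
    congr 1
    exact stepEq t sec
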